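-- pv_equiv track=rewrite | github.com/jailad/Self-Driving-Cars-Term1-Project5 | project/project.py | compare_current_centroids_with_historical_centroids
-- ===== SOURCE A (Python) =====
-- const_detection_threshold_x = 60 # Threshold for the difference between x co ordinate of centroid of current frame to historical frames
--
-- const_detection_threshold_y = 60 # Threshold for the difference between y co ordinate of centroid of current frame to historical frames
--
-- def compare_current_centroids_with_historical_centroids(current_centroid_list, flattened_historical_centroids):
--     proximity_list_for_centroids = list()
--     for centroid in current_centroid_list:
--         proximity_count_for_current_centroid = 0
--         for historical_centroid in flattened_historical_centroids:
--             abs_delta_x = abs(historical_centroid[0] - centroid[0])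
--             abs_delta_y = abs(historical_centroid[1] - centroid[1])
--             if abs_delta_x <= const_detection_threshold_x and abs_delta_y <= const_detection_threshold_y:
--                 proximity_count_for_current_centroid = proximity_count_for_current_centroid + 1
--         proximity_list_for_centroids.append(proximity_count_for_current_centroid)
--     return proximity_list_for_centroids
-- ===== SOURCE B (Python) =====
-- const_detection_threshold_x = 60
-- const_detection_threshold_y = 60
--
-- def _bisect_left(keys, v):
--     lo, hi = 0, len(keys)
--     while lo < hi:
--         mid = (lo + hi) // 2
--         if keys[mid] < v:
--             lo = mid + 1
--         else:
--             hi = mid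
--     return lo
--
-- def compare_current_centroids_with_historical_centroids(current_centroid_list, flattened_historical_centroids):
--     hist = sorted(flattened_historical_centroids, key=lambda p: p[0])
--     keys = [p[0] for p in hist]
--     result = []
--     for centroid in current_centroid_list:
--         lo = _bisect_left(keys, centroid[0] - const_detection_threshold_x)
--         hi = _bisect_left(keys, centroid[0] + const_detection_threshold_x + 1)
--         count = 0
--         for p in hist[lo:hi]:
--             if abs(p[1] - centroid[1]) <= const_detection_threshold_y:
--                 count += 1
--         result.append(count)
--     return result
-- ===== Notes on version B (the rewrite author's own statement) =====
-- stated objective: faster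
-- what changed: B sorts the historical centroids by x once and, per current centroid, binary-searches the x-window and scans only that slice, instead of A's full inner scan over all historical centroids per current centroid.
import Mathlib
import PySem

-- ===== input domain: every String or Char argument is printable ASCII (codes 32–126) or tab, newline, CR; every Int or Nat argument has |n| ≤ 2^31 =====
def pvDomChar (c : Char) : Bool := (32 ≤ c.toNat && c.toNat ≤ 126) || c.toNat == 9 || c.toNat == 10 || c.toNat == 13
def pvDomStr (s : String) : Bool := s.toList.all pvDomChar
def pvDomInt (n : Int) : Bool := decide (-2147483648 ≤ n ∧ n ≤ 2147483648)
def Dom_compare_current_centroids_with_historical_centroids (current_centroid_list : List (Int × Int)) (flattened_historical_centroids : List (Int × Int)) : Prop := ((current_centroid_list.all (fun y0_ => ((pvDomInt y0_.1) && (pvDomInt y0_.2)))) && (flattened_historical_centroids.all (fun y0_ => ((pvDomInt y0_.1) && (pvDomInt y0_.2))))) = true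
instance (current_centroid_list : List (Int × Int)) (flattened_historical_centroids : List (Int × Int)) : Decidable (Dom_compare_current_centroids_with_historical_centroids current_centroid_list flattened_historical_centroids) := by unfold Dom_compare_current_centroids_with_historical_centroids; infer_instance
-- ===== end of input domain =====

-- ===== PORT A =====
-- B re-implements A by sorting the historical centroids by x once and binary-searching
-- the x-window per current centroid, scanning only that slice (objective: faster).
def const_detection_threshold_x : Int := 60
def const_detection_threshold_y : Int := 60

def compare_current_centroids_with_historical_centroids (current_centroid_list : List (Int × Int)) (flattened_historical_centroids : List (Int × Int)) : List Int :=
  current_centroid_list.foldl (fun proximity_list centroid =>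
    proximity_list ++ [flattened_historical_centroids.foldl (fun cnt h =>
      let abs_delta_x := |h.1 - centroid.1|
      let abs_delta_y := |h.2 - centroid.2|
      if abs_delta_x ≤ const_detection_threshold_x ∧ abs_delta_y ≤ const_detection_threshold_y
      then cnt + 1 else cnt) (0 : Int)]) []

-- ===== PORT B =====
-- Source B's hand-written binary search; keys[mid] is always in range when lo < hi ≤ len,
-- so List.getD is exact there, and Nat (lo+hi)/2 equals Python's // on these nonnegatives
def pvBisectLoop (keys : List Int) (v : Int) (lo hi : Nat) : Nat :=
  if _h : lo < hi then
    let mid := (lo + hi) / 2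
    if keys.getD mid 0 < v then pvBisectLoop keys v (mid + 1) hi
    else pvBisectLoop keys v lo mid
  else lo
termination_by hi - lo
decreasing_by all_goals omega

def pvBisectLeft (keys : List Int) (v : Int) : Nat := pvBisectLoop keys v 0 keys.length

-- hist[lo:hi] with 0 ≤ lo ≤ hi is exactly (hist.drop lo).take (hi - lo) (PySem.List.slice_natCast)
def compare_current_centroids_with_historical_centroids_alt (current_centroid_list : List (Int × Int)) (flattened_historical_centroids : List (Int × Int)) : List Int :=
  let hist := PySem.List.sorted flattened_historical_centroids (fun p => p.1) false
  let keys := hist.map (fun p => p.1)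
  current_centroid_list.foldl (fun result centroid =>
    let lo := pvBisectLeft keys (centroid.1 - const_detection_threshold_x)
    let hi := pvBisectLeft keys (centroid.1 + const_detection_threshold_x + 1)
    let count := ((hist.drop lo).take (hi - lo)).foldl (fun c p =>
      if |p.2 - centroid.2| ≤ const_detection_threshold_y then c + 1 else c) (0 : Int)
    result ++ [count]) []

-- ===== PRECONDITION & SPEC =====
def Spec_compare_current_centroids_with_historical_centroids (current_centroid_list : List (Int × Int)) (flattened_historical_centroids : List (Int × Int)) (out : List Int) : Prop := out = compare_current_centroids_with_historical_centroids_alt current_centroid_list flattened_historical_centroids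
instance (current_centroid_list : List (Int × Int)) (flattened_historical_centroids : List (Int × Int)) (out : List Int) : Decidable (Spec_compare_current_centroids_with_historical_centroids current_centroid_list flattened_historical_centroids out) := by unfold Spec_compare_current_centroids_with_historical_centroids; infer_instance

-- ===== CLAIM (what is proved, stated in full; the proofs are below) =====
def Claim_equal_compare_current_centroids_with_historical_centroids : Prop := ∀ (current_centroid_list : List (Int × Int)) (flattened_historical_centroids : List (Int × Int)), Dom_compare_current_centroids_with_historical_centroids current_centroid_list flattened_historical_centroids → Spec_compare_current_centroids_with_historical_centroids current_centroid_list flattened_historical_centroids (compare_current_centroids_with_historical_centroids current_centroid_list flattened_historical_centroids)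

-- ===== LEMMAS AND PROOFS =====

theorem pvBisectLoop_spec (keys : List Int) (v : Int) :
    ∀ lo hi : Nat, lo ≤ hi → hi ≤ keys.length →
    (∀ i (h : i < keys.length), i < lo → keys[i] < v) →
    (∀ i (h : i < keys.length), hi ≤ i → v ≤ keys[i]) →
    keys.Pairwise (· ≤ ·) →
    pvBisectLoop keys v lo hi ≤ keys.length ∧
      (∀ i (h : i < keys.length), i < pvBisectLoop keys v lo hi → keys[i] < v) ∧
      (∀ i (h : i < keys.length), pvBisectLoop keys v lo hi ≤ i → v ≤ keys[i]) := by
  intro lo hi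
  induction lo, hi using pvBisectLoop.induct keys v with
  | case1 lo hi h mid hcond ih =>
    intro hle hhi hbelow habove hp
    have hmeq : mid = (lo + hi) / 2 := rfl
    rw [pvBisectLoop]; simp only [dif_pos h]; rw [← hmeq, if_pos hcond]
    have hmid : mid < keys.length := by omega
    have hmono : ∀ i j (hi' : i < keys.length) (hj : j < keys.length), i ≤ j → keys[i] ≤ keys[j] := by
      intro i j hi' hj hij
      rcases Nat.eq_or_lt_of_le hij with rfl | hlt2
      · exact le_refl _
      · exact List.pairwise_iff_getElem.mp hp i j hi' hj hlt2
    have hg : keys[mid] < v := by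
      rwa [List.getD_eq_getElem keys 0 hmid] at hcond
    exact ih (by omega) hhi
      (fun i hI hil => lt_of_le_of_lt (hmono i _ hI hmid (by omega)) hg)
      habove hp
  | case2 lo hi h mid hcond ih =>
    intro hle hhi hbelow habove hp
    have hmeq : mid = (lo + hi) / 2 := rfl
    rw [pvBisectLoop]; simp only [dif_pos h]; rw [← hmeq, if_neg hcond]
    have hmid : mid < keys.length := by omega
    have hmono : ∀ i j (hi' : i < keys.length) (hj : j < keys.length), i ≤ j → keys[i] ≤ keys[j] := by
      intro i j hi' hj hij
      rcases Nat.eq_or_lt_of_le hij with rfl | hlt2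
      · exact le_refl _
      · exact List.pairwise_iff_getElem.mp hp i j hi' hj hlt2
    have hg : v ≤ keys[mid] := by
      rw [List.getD_eq_getElem keys 0 hmid] at hcond; omega
    exact ih (by omega) (by omega) hbelow
      (fun i hI hil => le_trans hg (hmono _ i hmid hI (by omega))) hp
  | case3 lo hi h =>
    intro hle hhi hbelow habove hp
    rw [pvBisectLoop]; simp only [dif_neg h]
    exact ⟨by omega, fun i hI hil => hbelow i hI hil, fun i hI hil => habove i hI (by omega)⟩

theorem pvBisectLeft_spec (keys : List Int) (v : Int) (hp : keys.Pairwise (· ≤ ·)) :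
    pvBisectLeft keys v ≤ keys.length ∧
      (∀ i (h : i < keys.length), i < pvBisectLeft keys v → keys[i] < v) ∧
      (∀ i (h : i < keys.length), pvBisectLeft keys v ≤ i → v ≤ keys[i]) := by
  exact pvBisectLoop_spec keys v 0 keys.length (by omega) (le_refl _)
    (fun i hI hil => absurd hil (by omega))
    (fun i hI hil => absurd hil (by omega)) hp

theorem pvFoldlCount {α : Type} (p : α → Prop) [DecidablePred p] (l : List α) (n : Int) :
    l.foldl (fun acc x => if p x then acc + 1 else acc) n
      = n + (l.countP (fun x => decide (p x)) : Int) := by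
  induction l generalizing n with
  | nil => simp
  | cons a t ih =>
    by_cases h : p a
    · rw [List.foldl_cons, if_pos h, List.countP_cons, ih (n + 1)]
      simp [h]
      ring
    · rw [List.foldl_cons, if_neg h, List.countP_cons, ih n]
      simp [h]

theorem inner_count_eq (centroid : Int × Int) (hist : List (Int × Int)) :
    (hist.foldl (fun cnt h =>
      let abs_delta_x := |h.1 - centroid.1|
      let abs_delta_y := |h.2 - centroid.2|
      if abs_delta_x ≤ const_detection_threshold_x ∧ abs_delta_y ≤ const_detection_threshold_y
      then cnt + 1 else cnt) (0 : Int)) =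
    (let s := PySem.List.sorted hist (fun p => p.1) false
     let keys := s.map (fun p => p.1)
     let lo := pvBisectLeft keys (centroid.1 - const_detection_threshold_x)
     let hi := pvBisectLeft keys (centroid.1 + const_detection_threshold_x + 1)
     ((s.drop lo).take (hi - lo)).foldl (fun c p =>
       if |p.2 - centroid.2| ≤ const_detection_threshold_y then c + 1 else c) (0 : Int)) := by
  simp only [const_detection_threshold_x, const_detection_threshold_y]
  set s := PySem.List.sorted hist (fun p => p.1) false with hs
  set keys := s.map (fun p => p.1) with hkeys
  set v1 := centroid.1 - 60 with hv1
  set v2 := centroid.1 + 60 + 1 with hv2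
  set lo := pvBisectLeft keys v1 with hlo
  set hi := pvBisectLeft keys v2 with hhi
  have hp : keys.Pairwise (· ≤ ·) := PySem.List.sorted_map_key_pairwise hist (fun p => p.1)
  have hlen : keys.length = s.length := List.length_map _
  obtain ⟨hlo_le, hlo_below, hlo_above⟩ := pvBisectLeft_spec keys v1 hp
  obtain ⟨hhi_le, hhi_below, hhi_above⟩ := pvBisectLeft_spec keys v2 hp
  have hkey : ∀ i (h : i < s.length), keys[i]'(by omega) = s[i].1 := by
    intro i h; simp [hkeys]
  have hlohi : lo ≤ hi := by
    by_contra hcon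
    rw [Nat.not_le] at hcon
    have h1 : hi < keys.length := by omega
    have h2 := hlo_below hi h1 hcon
    have h3 := hhi_above hi h1 (le_refl _)
    omega
  have hL := pvFoldlCount (fun h : Int × Int => |h.1 - centroid.1| ≤ 60 ∧ |h.2 - centroid.2| ≤ 60) hist 0
  have hR := pvFoldlCount (fun p : Int × Int => |p.2 - centroid.2| ≤ 60) ((s.drop lo).take (hi - lo)) 0
  refine hL.trans (Eq.trans ?_ hR.symm)
  rw [zero_add, zero_add, Nat.cast_inj]
  have hperm : s.Perm hist := PySem.List.sorted_perm hist (fun p => p.1) false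
  rw [← hperm.countP_eq]
  have hdd : (List.drop lo s).drop (hi - lo) = s.drop hi := by
    rw [List.drop_drop, Nat.add_sub_cancel' hlohi]
  have hsplit : s = s.take lo ++ ((s.drop lo).take (hi - lo) ++ s.drop hi) := by
    conv_lhs => rw [← List.take_append_drop lo s, ← List.take_append_drop (hi - lo) (s.drop lo)]
    rw [hdd]
  conv_lhs => rw [hsplit]
  rw [List.countP_append, List.countP_append]
  have hA : (s.take lo).countP (fun x => decide (|x.1 - centroid.1| ≤ 60 ∧ |x.2 - centroid.2| ≤ 60)) = 0 := by
    rw [List.countP_eq_zero]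
    intro a ha
    obtain ⟨i, hilt, rfl⟩ := List.mem_iff_getElem.mp ha
    have hil : i < lo := by
      have := hilt
      simp [List.length_take] at this
      omega
    have hisl : i < s.length := by
      have := List.length_take_le lo s
      have := hilt
      simp [List.length_take] at this
      omega
    have hk := hlo_below i (by omega) hil
    rw [hkey i hisl] at hk
    simp only [List.getElem_take]
    simp only [decide_eq_true_eq, not_and]
    intro hx
    rw [abs_le] at hx
    omega
  have hC : (s.drop hi).countP (fun x => decide (|x.1 - centroid.1| ≤ 60 ∧ |x.2 - centroid.2| ≤ 60)) = 0 := by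
    rw [List.countP_eq_zero]
    intro a ha
    obtain ⟨i, hilt, rfl⟩ := List.mem_iff_getElem.mp ha
    have hisl : hi + i < s.length := by
      have := hilt
      simp [List.length_drop] at this
      omega
    have hk := hhi_above (hi + i) (by omega) (by omega)
    rw [hkey (hi + i) hisl] at hk
    simp only [List.getElem_drop]
    simp only [decide_eq_true_eq, not_and]
    intro hx
    rw [abs_le] at hx
    omega
  have hB : ((s.drop lo).take (hi - lo)).countP (fun x => decide (|x.1 - centroid.1| ≤ 60 ∧ |x.2 - centroid.2| ≤ 60))
      = ((s.drop lo).take (hi - lo)).countP (fun x => decide (|x.2 - centroid.2| ≤ 60)) := by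
    apply List.countP_congr
    intro a ha
    obtain ⟨i, hilt, rfl⟩ := List.mem_iff_getElem.mp ha
    have hbnd : i < hi - lo ∧ lo + i < s.length := by
      have := hilt
      simp [List.length_take, List.length_drop] at this
      omega
    have hisl : lo + i < s.length := hbnd.2
    have hk1 := hlo_above (lo + i) (by omega) (by omega)
    have hk2 := hhi_below (lo + i) (by omega) (by omega)
    rw [hkey (lo + i) hisl] at hk1 hk2
    have hx : |s[lo + i].1 - centroid.1| ≤ 60 := by
      rw [abs_le]
      omega
    simp only [List.getElem_take, List.getElem_drop]
    simp only [decide_eq_true_eq]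
    exact and_iff_right hx
  rw [hA, hB, hC]
  omega

-- ===== VERDICT (by name: the statement is the Claim_ definition above) =====
theorem compare_current_centroids_with_historical_centroids_spec : Claim_equal_compare_current_centroids_with_historical_centroids := by
  intro cur hist _
  unfold Spec_compare_current_centroids_with_historical_centroids
  unfold compare_current_centroids_with_historical_centroids compare_current_centroids_with_historical_centroids_alt
  rw [PySem.List.foldl_append_singleton_eq_map, PySem.List.foldl_append_singleton_eq_map]
  simp only [List.nil_append]
  apply List.map_congr_left
  intro c _
  exact inner_count_eq c hist
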